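-- pv_equiv track=rewrite | github.com/Evolveum/midpilot-connector-gen | src/modules/digester/extractors/rest/object_class.py | _normalize_chunk_refs
-- ===== SOURCE A (Python) =====
-- from typing import Any, Dict, List, Optional, Tuple, cast
--
-- def _normalize_chunk_refs(chunks: Optional[List[Dict[str, Any]]]) -> List[Dict[str, str]]:
--     unique_pairs: set[tuple[str, str]] = set()
--     for chunk in chunks or []:
--         doc_id = str(chunk.get("doc_id", "")).strip()
--         chunk_id = str(chunk.get("chunk_id", "")).strip()
--         if doc_id and chunk_id:
--             unique_pairs.add((doc_id, chunk_id))
--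
--     return [{"doc_id": doc_id, "chunk_id": chunk_id} for doc_id, chunk_id in sorted(unique_pairs)]
-- ===== SOURCE B (Python) =====
-- from typing import Any, Dict, List, Optional
--
--
-- def _normalize_chunk_refs(chunks: Optional[List[Dict[str, Any]]]) -> List[Dict[str, str]]:
--     # Maintain a sorted, duplicate-free list incrementally: each valid pair is
--     # inserted at its ordered position (or skipped if already present), so no
--     # set and no final sort are needed.
--     ordered: List[tuple] = []
--     for chunk in chunks or []:
--         doc_id = str(chunk.get("doc_id", "")).strip()
--         chunk_id = str(chunk.get("chunk_id", "")).strip()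
--         if doc_id and chunk_id:
--             pair = (doc_id, chunk_id)
--             i = 0
--             while i < len(ordered) and ordered[i] < pair:
--                 i += 1
--             if i == len(ordered) or ordered[i] != pair:
--                 ordered.insert(i, pair)
--     return [{"doc_id": d, "chunk_id": c} for d, c in ordered]
-- ===== Notes on version B (the rewrite author's own statement) =====
-- stated objective: alternative
-- what changed: Replaces A's hash-set accumulation followed by a final sort with an online insertion sort: a sorted duplicate-free list is maintained throughout, each valid pair being scanned to its ordered position and inserted (or skipped when already present), so there is no set and no terminal sorting pass.
import Mathlib
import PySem

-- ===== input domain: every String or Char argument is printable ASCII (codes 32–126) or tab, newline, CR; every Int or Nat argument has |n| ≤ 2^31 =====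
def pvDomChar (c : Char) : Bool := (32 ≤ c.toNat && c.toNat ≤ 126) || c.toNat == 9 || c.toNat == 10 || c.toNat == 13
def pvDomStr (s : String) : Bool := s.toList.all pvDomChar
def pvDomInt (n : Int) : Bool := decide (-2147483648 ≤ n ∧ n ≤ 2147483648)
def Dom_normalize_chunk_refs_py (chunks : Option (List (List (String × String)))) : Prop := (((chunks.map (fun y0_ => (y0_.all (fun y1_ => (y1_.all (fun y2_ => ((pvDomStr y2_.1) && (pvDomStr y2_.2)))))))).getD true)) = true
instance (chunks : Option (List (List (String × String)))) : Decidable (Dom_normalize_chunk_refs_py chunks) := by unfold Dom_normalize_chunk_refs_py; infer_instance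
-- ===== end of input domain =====

-- B maintains a sorted duplicate-free list by in-order insertion (online insertion
-- sort, no set and no final sort); the return values are proved equal to A's.


-- ===== PORT A =====
def normalize_chunk_refs_py (chunks : Option (List (List (String × String)))) : List (List (String × String)) :=
  let unique_pairs : PySem.Set (String × String) :=
    (chunks.getD []).foldl (fun s chunk =>
      let doc_id := PySem.Str.strip ((PySem.Dict.mk chunk).getD "doc_id" "")
      let chunk_id := PySem.Str.strip ((PySem.Dict.mk chunk).getD "chunk_id" "")
      if doc_id ≠ "" ∧ chunk_id ≠ "" then PySem.Set.add s (doc_id, chunk_id) else s)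
      PySem.Set.empty
  (PySem.List.sorted unique_pairs (fun p => toLex p) false).map
    (fun p => [("doc_id", p.1), ("chunk_id", p.2)])

-- ===== PORT B =====
-- transliteration of B's while-scan + insert/skip: walk past smaller elements,
-- skip an equal element, otherwise insert the pair at the scan position
def pvIns (p : String × String) : List (String × String) → List (String × String)
  | [] => [p]
  | x :: t =>
      if (toLex x : Lex (String × String)) < toLex p then x :: pvIns p t
      else if x = p then x :: t
      else p :: x :: t

def normalize_chunk_refs_py_alt (chunks : Option (List (List (String × String)))) : List (List (String × String)) :=
  let ordered : List (String × String) :=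
    (chunks.getD []).foldl (fun acc chunk =>
      let doc_id := PySem.Str.strip ((PySem.Dict.mk chunk).getD "doc_id" "")
      let chunk_id := PySem.Str.strip ((PySem.Dict.mk chunk).getD "chunk_id" "")
      if doc_id ≠ "" ∧ chunk_id ≠ "" then pvIns (doc_id, chunk_id) acc else acc) []
  ordered.map (fun p => [("doc_id", p.1), ("chunk_id", p.2)])

-- ===== PRECONDITION & SPEC =====
def Spec_normalize_chunk_refs_py (chunks : Option (List (List (String × String)))) (out : List (List (String × String))) : Prop := out = normalize_chunk_refs_py_alt chunks
instance (chunks : Option (List (List (String × String)))) (out : List (List (String × String))) : Decidable (Spec_normalize_chunk_refs_py chunks out) := by unfold Spec_normalize_chunk_refs_py; infer_instance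

-- ===== CLAIM (what is proved, stated in full; the proofs are below) =====
def Claim_equal_normalize_chunk_refs_py : Prop := ∀ (chunks : Option (List (List (String × String)))), Dom_normalize_chunk_refs_py chunks → Spec_normalize_chunk_refs_py chunks (normalize_chunk_refs_py chunks)

-- ===== LEMMAS AND PROOFS =====

-- the (doc_id, chunk_id) pair extracted from a chunk (common shape of both loops)
def pvPair (chunk : List (String × String)) : String × String :=
  (PySem.Str.strip ((PySem.Dict.mk chunk).getD "doc_id" ""),
   PySem.Str.strip ((PySem.Dict.mk chunk).getD "chunk_id" ""))

-- the valid pairs, duplicates kept, in chunk order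
def pvPairs (chunks : Option (List (List (String × String)))) : List (String × String) :=
  ((chunks.getD []).filter
    (fun c => decide ((pvPair c).1 ≠ "" ∧ (pvPair c).2 ≠ ""))).map pvPair

lemma pvIns_mem (p x : String × String) (l : List (String × String)) :
    x ∈ pvIns p l ↔ x = p ∨ x ∈ l := by
  induction l with
  | nil => simp [pvIns]
  | cons y t ih =>
      by_cases h1 : (toLex y : Lex (String × String)) < toLex p
      · simp [pvIns, h1, ih]; tauto
      · by_cases h2 : y = p
        · subst h2; simp [pvIns]
        · simp [pvIns, h1, h2]

lemma pvIns_pairwise (p : String × String) (l : List (String × String))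
    (h : l.Pairwise (fun a b => (toLex a : Lex (String × String)) < toLex b)) :
    (pvIns p l).Pairwise (fun a b => (toLex a : Lex (String × String)) < toLex b) := by
  induction l with
  | nil => simp [pvIns]
  | cons y t ih =>
      have hy := (List.pairwise_cons.mp h).1
      have ht := (List.pairwise_cons.mp h).2
      by_cases h1 : (toLex y : Lex (String × String)) < toLex p
      · rw [pvIns, if_pos h1]
        refine List.pairwise_cons.mpr ⟨?_, ih ht⟩
        intro z hz
        rcases (pvIns_mem p z t).mp hz with rfl | hz'
        · exact h1
        · exact hy z hz'
      · by_cases h2 : y = p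
        · rw [pvIns, if_neg h1, if_pos h2]; exact h
        · rw [pvIns, if_neg h1, if_neg h2]
          have hpy : (toLex p : Lex (String × String)) < toLex y := by
            rcases lt_trichotomy (toLex p : Lex (String × String)) (toLex y) with h' | h' | h'
            · exact h'
            · exact absurd (toLex.injective h').symm h2
            · exact absurd h' h1
          refine List.pairwise_cons.mpr ⟨?_, h⟩
          intro z hz
          rcases List.mem_cons.mp hz with rfl | hz'
          · exact hpy
          · exact lt_trans hpy (hy z hz')

lemma pvFold_spec (l : List (String × String)) :
    ∀ acc : List (String × String),
      acc.Pairwise (fun a b => (toLex a : Lex (String × String)) < toLex b) →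
      (l.foldl (fun a p => pvIns p a) acc).Pairwise
          (fun a b => (toLex a : Lex (String × String)) < toLex b) ∧
        (∀ x, x ∈ l.foldl (fun a p => pvIns p a) acc ↔ x ∈ acc ∨ x ∈ l) := by
  induction l with
  | nil => intro acc h; simpa using h
  | cons p t ih =>
      intro acc h
      obtain ⟨hpw, hmem⟩ := ih (pvIns p acc) (pvIns_pairwise p acc h)
      refine ⟨hpw, fun x => ?_⟩
      rw [List.foldl_cons, hmem x, pvIns_mem]
      simp; tauto

-- A's set-building loop builds set(pvPairs)
lemma pvA_fold_eq (chunks : Option (List (List (String × String)))) :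
    (chunks.getD []).foldl (fun s chunk =>
      let doc_id := PySem.Str.strip ((PySem.Dict.mk chunk).getD "doc_id" "")
      let chunk_id := PySem.Str.strip ((PySem.Dict.mk chunk).getD "chunk_id" "")
      if doc_id ≠ "" ∧ chunk_id ≠ "" then PySem.Set.add s (doc_id, chunk_id) else s)
      PySem.Set.empty = PySem.Set.ofList (pvPairs chunks) := by
  show (chunks.getD []).foldl
      (fun s c => if (pvPair c).1 ≠ "" ∧ (pvPair c).2 ≠ "" then PySem.Set.add s (pvPair c) else s)
      PySem.Set.empty = PySem.Set.ofList (pvPairs chunks)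
  rw [PySem.List.foldl_ite_eq_foldl_filter, ← PySem.Set.update_map_eq_foldl_add]
  rw [show (PySem.Set.empty : PySem.Set (String × String)) = [] from rfl,
    PySem.Set.update_nil_left]
  rfl

-- B's loop is the pvIns-fold over pvPairs
lemma pvB_fold_eq (chunks : Option (List (List (String × String)))) :
    (chunks.getD []).foldl (fun acc chunk =>
      let doc_id := PySem.Str.strip ((PySem.Dict.mk chunk).getD "doc_id" "")
      let chunk_id := PySem.Str.strip ((PySem.Dict.mk chunk).getD "chunk_id" "")
      if doc_id ≠ "" ∧ chunk_id ≠ "" then pvIns (doc_id, chunk_id) acc else acc) []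
      = (pvPairs chunks).foldl (fun a p => pvIns p a) [] := by
  show (chunks.getD []).foldl
      (fun acc c => if (pvPair c).1 ≠ "" ∧ (pvPair c).2 ≠ "" then pvIns (pvPair c) acc else acc) []
      = (pvPairs chunks).foldl (fun a p => pvIns p a) []
  rw [PySem.List.foldl_ite_eq_foldl_filter, pvPairs, List.foldl_map]

theorem pv_main (chunks : Option (List (List (String × String)))) :
    normalize_chunk_refs_py chunks = normalize_chunk_refs_py_alt chunks := by
  obtain ⟨hpw, hmem⟩ := pvFold_spec (pvPairs chunks) [] (by simp)
  set L := (pvPairs chunks).foldl (fun a p => pvIns p a) [] with hL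
  have hnd : L.Nodup := by
    refine hpw.imp ?_
    intro a b hab hea
    subst hea
    exact lt_irrefl _ hab
  have hperm : L.Perm (PySem.Set.ofList (pvPairs chunks)) := by
    rw [List.perm_ext_iff_of_nodup hnd (PySem.Set.nodup_ofList _)]
    intro x
    rw [hmem x, PySem.Set.mem_ofList]
    simp
  have hsort := PySem.List.sorted_eq_of_perm_of_pairwise_lt _ _ _ hperm hpw
  simp only [normalize_chunk_refs_py, normalize_chunk_refs_py_alt]
  rw [pvA_fold_eq, pvB_fold_eq, ← hL, hsort]

-- ===== VERDICT (by name: the statement is the Claim_ definition above) =====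
theorem normalize_chunk_refs_py_spec : Claim_equal_normalize_chunk_refs_py := by
  intro chunks _
  unfold Spec_normalize_chunk_refs_py
  exact pv_main chunks
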